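-- pv_equiv track=rewrite | github.com/TinkerTools/tinker | python/boresch.py | write_tinker_idx
-- ===== SOURCE A (Python) =====
-- def write_tinker_idx(idxs):
--     idx_out = []
--     rs = []
--     for i0 in sorted(idxs):
--         if len(rs) == 0 or rs[-1][1]+1 < i0:
--             rs.append([i0, i0])
--         else:
--             rs[-1][1] = i0
--     for r in rs:
--         if r[0] == r[1]:
--             idx_out.append(r[0])
--         elif r[0] == r[1] - 1:
--             idx_out.append(r[0])
--             idx_out.append(r[1])
--         else:
--             idx_out.append(-r[0])
--             idx_out.append(r[1])
--     return idx_out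
-- ===== SOURCE B (Python) =====
-- def write_tinker_idx(idxs):
--     s = sorted(set(idxs))
--     if not s:
--         return []
--     pairs = list(zip(s, s[1:]))
--     starts = [s[0]] + [q for p, q in pairs if q != p + 1]
--     ends = [p for p, q in pairs if q != p + 1] + [s[-1]]
--     out = []
--     for a, b in zip(starts, ends):
--         if b == a:
--             out.append(a)
--         elif b == a + 1:
--             out += [a, b]
--         else:
--             out += [-a, b]
--     return out
-- ===== Notes on version B (the rewrite author's own statement) =====
-- stated objective: alternative
-- what changed: B replaces A's single accumulator fold that grows and mutates a run list in place with two independent adjacent-pair boundary scans over sorted(set(idxs)) (run starts and run ends as comprehensions over zip(s, s[1:])) zipped into (start, end) pairs before emission.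
import Mathlib
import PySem

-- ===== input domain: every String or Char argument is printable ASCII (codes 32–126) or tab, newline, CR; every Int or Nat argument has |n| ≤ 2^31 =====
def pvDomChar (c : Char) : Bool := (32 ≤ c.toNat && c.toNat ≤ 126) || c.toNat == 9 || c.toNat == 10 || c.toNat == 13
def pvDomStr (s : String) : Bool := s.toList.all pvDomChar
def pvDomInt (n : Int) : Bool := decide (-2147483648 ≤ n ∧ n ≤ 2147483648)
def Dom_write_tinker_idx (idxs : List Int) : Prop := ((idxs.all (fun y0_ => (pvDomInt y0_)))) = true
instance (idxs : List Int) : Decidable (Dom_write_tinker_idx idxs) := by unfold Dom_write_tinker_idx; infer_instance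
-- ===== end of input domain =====

-- B replaces A's accumulator fold that grows/mutates a run list with two independent
-- adjacent-pair boundary scans over sorted(set(idxs)) zipped into (start, end) pairs
-- (objective: alternative decomposition, same cost).

-- ===== PORT A =====
-- the loop body of A's first 'for': rs[-1] is getLast?, mutation of rs[-1][1] is dropLast ++ [updated]
def stepA (rs : List (Int × Int)) (i0 : Int) : List (Int × Int) :=
  match rs.getLast? with
  | none => rs ++ [(i0, i0)]
  | some r => if r.2 + 1 < i0 then rs ++ [(i0, i0)] else rs.dropLast ++ [(r.1, i0)]

-- the loop body of A's second 'for'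
def emitA (out : List Int) (r : Int × Int) : List Int :=
  if r.1 = r.2 then out ++ [r.1]
  else if r.1 = r.2 - 1 then out ++ [r.1, r.2]
  else out ++ [-r.1, r.2]

def write_tinker_idx (idxs : List Int) : List Int :=
  (((PySem.List.sorted idxs (fun x => x)).foldl stepA []).foldl emitA [])

-- ===== PORT B =====
-- the loop body of B's 'for a, b in zip(starts, ends)'
def emitB (out : List Int) (p : Int × Int) : List Int :=
  if p.2 = p.1 then out ++ [p.1]
  else if p.2 = p.1 + 1 then out ++ [p.1, p.2]
  else out ++ [-p.1, p.2]

-- body of B after the 'if not s' guard: s = x :: rest, pairs = zip(s, s[1:]),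
-- brks the pairs with q != p + 1, starts = [s[0]] + [q ...], ends = [p ...] + [s[-1]]
def brksB (x : Int) (rest : List Int) : List (Int × Int) :=
  ((x :: rest).zip rest).filter (fun p => decide (p.2 ≠ p.1 + 1))

def bodyB (x : Int) (rest : List Int) : List Int :=
  ((x :: (brksB x rest).map Prod.snd).zip
    ((brksB x rest).map Prod.fst ++ [rest.getLastD x])).foldl emitB []

def write_tinker_idx_alt (idxs : List Int) : List Int :=
  match PySem.List.sorted (PySem.Set.ofList idxs) (fun x => x) with
  | [] => []
  | x :: rest => bodyB x rest

-- ===== PRECONDITION & SPEC =====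
def Spec_write_tinker_idx (idxs : List Int) (out : List Int) : Prop := out = write_tinker_idx_alt idxs
instance (idxs : List Int) (out : List Int) : Decidable (Spec_write_tinker_idx idxs out) := by unfold Spec_write_tinker_idx; infer_instance

-- ===== CLAIM (what is proved, stated in full; the proofs are below) =====
def Claim_equal_write_tinker_idx : Prop := ∀ (idxs : List Int), Dom_write_tinker_idx idxs → Spec_write_tinker_idx idxs (write_tinker_idx idxs)

-- ===== LEMMAS AND PROOFS =====

-- the run list both programs describe: runs a b t extends the open run [a, b] by t
def runs (a b : Int) : List Int → List (Int × Int)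
  | [] => [(a, b)]
  | x :: t => if b + 1 < x then (a, b) :: runs x x t else runs a x t

-- adjacent dedup of a sorted list with seed b (the tail of sorted(set(...)) after b)
def ded (b : Int) : List Int → List Int
  | [] => []
  | x :: t => if b < x then x :: ded x t else ded b t

lemma stepA_concat (acc : List (Int × Int)) (a b x : Int) :
    stepA (acc ++ [(a, b)]) x =
      if b + 1 < x then (acc ++ [(a, b)]) ++ [(x, x)] else acc ++ [(a, x)] := by
  simp [stepA]

lemma foldA : ∀ (t : List Int) (acc : List (Int × Int)) (a b : Int),
    t.foldl stepA (acc ++ [(a, b)]) = acc ++ runs a b t := by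
  intro t
  induction t with
  | nil => intro acc a b; simp [runs]
  | cons x t ih =>
    intro acc a b
    simp only [List.foldl_cons, stepA_concat, runs]
    by_cases h : b + 1 < x
    · simp only [if_pos h]
      rw [show (acc ++ [(a, b)]) ++ [(x, x)] = (acc ++ [(a, b)]) ++ [(x, x)] from rfl, ih]
      simp
    · simp only [if_neg h, ih]

lemma emitA_eq_emitB : emitA = emitB := by
  funext out r
  simp only [emitA, emitB]
  split_ifs with h1 h2 h3 h4 h5 h6 h7 <;> first | rfl | omega

lemma mem_of_mem_ded : ∀ (t : List Int) (b z : Int), z ∈ ded b t → z ∈ t := by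
  intro t
  induction t with
  | nil => intro b z h; simp [ded] at h
  | cons x t ih =>
    intro b z h
    simp only [ded] at h
    by_cases hx : b < x
    · rw [if_pos hx] at h
      rcases List.mem_cons.mp h with h | h
      · simp [h]
      · exact List.mem_cons_of_mem _ (ih x z h)
    · rw [if_neg hx] at h
      exact List.mem_cons_of_mem _ (ih b z h)

lemma mem_ded_of_mem : ∀ (t : List Int) (b z : Int),
    (∀ y ∈ t, b ≤ y) → t.Pairwise (· ≤ ·) → z ∈ t → z = b ∨ z ∈ ded b t := by
  intro t
  induction t with
  | nil => intro b z _ _ h; simp at h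
  | cons x t ih =>
    intro b z hb hp hz
    have hp' := (List.pairwise_cons.mp hp).2
    have hx := (List.pairwise_cons.mp hp).1
    simp only [ded]
    by_cases hbx : b < x
    · rw [if_pos hbx]
      rcases List.mem_cons.mp hz with h | h
      · right; simp [h]
      · rcases ih x z hx hp' h with h' | h'
        · right; simp [h']
        · right; exact List.mem_cons_of_mem _ h'
    · have hxb : x = b := le_antisymm (not_lt.mp hbx) (hb x (by simp))
      rw [if_neg hbx]
      rcases List.mem_cons.mp hz with h | h
      · left; omega
      · exact ih b z (fun y hy => hxb ▸ hx y hy) hp' h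

lemma pair_ded : ∀ (t : List Int) (b : Int),
    (∀ y ∈ t, b ≤ y) → t.Pairwise (· ≤ ·) → (b :: ded b t).Pairwise (· < ·) := by
  intro t
  induction t with
  | nil => intro b _ _; simp [ded]
  | cons x t ih =>
    intro b hb hp
    have hp' := (List.pairwise_cons.mp hp).2
    have hx := (List.pairwise_cons.mp hp).1
    simp only [ded]
    by_cases hbx : b < x
    · rw [if_pos hbx]
      have h2 := ih x hx hp'
      refine List.pairwise_cons.mpr ⟨?_, h2⟩
      intro z hz
      rcases List.mem_cons.mp hz with h | h
      · omega
      · have := mem_of_mem_ded t x z h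
        have := hx z this
        omega
    · have hxb : x = b := le_antisymm (not_lt.mp hbx) (hb x (by simp))
      rw [if_neg hbx]
      exact ih b (fun y hy => hxb ▸ hx y hy) hp'

lemma runs_ded : ∀ (t : List Int) (b a : Int),
    (∀ y ∈ t, b ≤ y) → t.Pairwise (· ≤ ·) → runs a b t = runs a b (ded b t) := by
  intro t
  induction t with
  | nil => intro b a _ _; rfl
  | cons x t ih =>
    intro b a hb hp
    have hp' := (List.pairwise_cons.mp hp).2
    have hx := (List.pairwise_cons.mp hp).1
    simp only [runs, ded]
    by_cases hbx : b < x
    · rw [if_pos hbx]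
      simp only [runs]
      by_cases h : b + 1 < x
      · rw [if_pos h, if_pos h, ih x x hx hp']
      · rw [if_neg h, if_neg h]
        have hxb : x = b + 1 := by omega
        exact ih x a hx hp'
    · have hxb : x = b := le_antisymm (not_lt.mp hbx) (hb x (by simp))
      rw [if_neg hbx]
      have : ¬ b + 1 < x := by omega
      rw [if_neg this]
      subst hxb
      exact ih x a (fun y hy => hx y hy) hp'

-- B's zip of boundary scans equals the run list, on a strictly increasing list
lemma zip_runs : ∀ (rest : List Int) (x a : Int), (x :: rest).Pairwise (· < ·) →
    ((a :: (((x :: rest).zip rest).filter (fun p => decide (p.2 ≠ p.1 + 1))).map Prod.snd).zip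
      ((((x :: rest).zip rest).filter (fun p => decide (p.2 ≠ p.1 + 1))).map Prod.fst
        ++ [rest.getLastD x])) = runs a x rest := by
  intro rest
  induction rest with
  | nil => intro x a _; simp [runs]
  | cons y t ih =>
    intro x a hp
    have hxy : x < y := (List.pairwise_cons.mp hp).1 y (by simp)
    have hp' : (y :: t).Pairwise (· < ·) := (List.pairwise_cons.mp hp).2
    simp only [List.zip_cons_cons, List.filter_cons]
    by_cases h : y = x + 1
    · have : (decide (((x, y) : Int × Int).2 ≠ (x, y).1 + 1)) = false := by simp [h]
      rw [this]
      simp only [Bool.false_eq_true, if_false, List.getLastD_cons]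
      rw [ih y a hp']
      simp only [runs]
      rw [if_neg (by omega)]
    · have : (decide (((x, y) : Int × Int).2 ≠ (x, y).1 + 1)) = true := by simp [h]
      rw [this]
      simp only [if_true, List.map_cons, List.getLastD_cons, List.cons_append, List.zip_cons_cons]
      rw [ih y y hp']
      simp only [runs]
      rw [if_pos (by omega)]

-- A's first loop computes the run list
lemma A_runs (t : List Int) : t.foldl stepA [] =
    (match t with | [] => ([] : List (Int × Int)) | x :: t' => runs x x t') := by
  cases t with
  | nil => rfl
  | cons x t' =>
    have h0 : stepA [] x = [] ++ [(x, x)] := by simp [stepA]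
    simp only [List.foldl_cons, h0]
    have h1 := foldA t' [] x x
    simpa using h1

lemma sorted_set_eq (idxs : List Int) (x : Int) (t' : List Int)
    (ht : PySem.List.sorted idxs (fun x => x) = x :: t') :
    PySem.List.sorted (PySem.Set.ofList idxs) (fun x => x) = x :: ded x t' := by
  have hp : (x :: t').Pairwise (· ≤ ·) := ht ▸ PySem.List.sorted_pairwise idxs (fun x => x)
  have hx := (List.pairwise_cons.mp hp).1
  have hp' := (List.pairwise_cons.mp hp).2
  apply PySem.List.sorted_eq_of_perm_of_pairwise_lt
  · apply (List.perm_ext_iff_of_nodup ?_ (PySem.Set.nodup_ofList idxs)).mpr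
    · intro z
      rw [PySem.Set.mem_ofList]
      have hmem : z ∈ idxs ↔ z ∈ x :: t' := by
        rw [← ht]; exact (PySem.List.mem_sorted idxs (fun x => x) false z).symm
      rw [hmem]
      constructor
      · intro h
        rcases List.mem_cons.mp h with h | h
        · simp [h]
        · exact List.mem_cons_of_mem _ (mem_of_mem_ded t' x z h)
      · intro h
        rcases List.mem_cons.mp h with h | h
        · simp [h]
        · rcases mem_ded_of_mem t' x z hx hp' h with h' | h'
          · simp [h']
          · exact List.mem_cons_of_mem _ h'
    · have := pair_ded t' x hx hp'
      exact List.Nodup.cons (fun h => by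
        have := (List.pairwise_cons.mp this).1 x h; omega)
        ((List.pairwise_cons.mp this).2.imp ne_of_lt)
  · exact pair_ded t' x hx hp'

-- ===== VERDICT (by name: the statement is the Claim_ definition above) =====
theorem write_tinker_idx_spec : Claim_equal_write_tinker_idx := by
  intro idxs _
  unfold Spec_write_tinker_idx
  rcases ht : PySem.List.sorted idxs (fun x => x) with _ | ⟨x, t'⟩
  · have hnil : idxs = [] := (PySem.List.sorted_eq_nil_iff idxs (fun x => x) false).mp ht
    subst hnil
    rfl
  · have hp : (x :: t').Pairwise (· ≤ ·) := ht ▸ PySem.List.sorted_pairwise idxs (fun x => x)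
    have hx := (List.pairwise_cons.mp hp).1
    have hp' := (List.pairwise_cons.mp hp).2
    have hs := sorted_set_eq idxs x t' ht
    have hA : write_tinker_idx idxs = (runs x x t').foldl emitA [] := by
      unfold write_tinker_idx
      rw [ht, A_runs]
    have hB : write_tinker_idx_alt idxs = (runs x x (ded x t')).foldl emitB [] := by
      unfold write_tinker_idx_alt
      rw [hs]
      have hlt : (x :: ded x t').Pairwise (· < ·) := pair_ded t' x hx hp'
      show bodyB x (ded x t') = _
      unfold bodyB brksB
      rw [zip_runs (ded x t') x x hlt]
    rw [hA, hB, runs_ded t' x x hx hp', emitA_eq_emitB]
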